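-- pv_equiv track=rewrite | github.com/KIM-KYOUNG-OH/Algorithm-by-python | LINE 코테/3번.py | solution
-- ===== SOURCE A (Python) =====
-- from itertools import permutations
--
-- def solution(ads):
--     answer = 0
--     for candidate in permutations(ads, len(ads)):
--         temp = 0
--         current_time = candidate[0][0]
--         for i in range(len(candidate)):
--             temp += (current_time - candidate[i][0]) * candidate[i][1]
--             current_time += 5
--         answer = min(answer, temp)
--     return answer
-- ===== SOURCE B (Python) =====
-- def solution(ads):
--     # Closed form per choice of first ad: with first start time tf, an ordering of the
--     # remaining ads costs sum(tf*w - t*w) plus 5 * sum(position * weight); by the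
--     # rearrangement inequality the positional sum is minimised by placing the remaining
--     # ads in descending weight order, so we only try each ad first and sort the rest.
--     best = 0
--     n = len(ads)
--     for i in range(n):
--         tf = ads[i][0]
--         rest = ads[:i] + ads[i + 1:]
--         ws = sorted((w for _, w in rest), reverse=True)
--         cost = sum(tf * w - t * w for t, w in rest) \
--             + 5 * sum((j + 1) * w for j, w in enumerate(ws))
--         best = min(best, cost)
--     return best
-- ===== Notes on version B (the rewrite author's own statement) =====
-- stated objective: faster
-- what changed: Replaces A's scan of all n! orderings (itertools.permutations, O(n!*n)) by a closed form: try each ad first and, by the rearrangement inequality, schedule the remaining ads in descending weight order, computing that cost directly from sums over the rest.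
import Mathlib
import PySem

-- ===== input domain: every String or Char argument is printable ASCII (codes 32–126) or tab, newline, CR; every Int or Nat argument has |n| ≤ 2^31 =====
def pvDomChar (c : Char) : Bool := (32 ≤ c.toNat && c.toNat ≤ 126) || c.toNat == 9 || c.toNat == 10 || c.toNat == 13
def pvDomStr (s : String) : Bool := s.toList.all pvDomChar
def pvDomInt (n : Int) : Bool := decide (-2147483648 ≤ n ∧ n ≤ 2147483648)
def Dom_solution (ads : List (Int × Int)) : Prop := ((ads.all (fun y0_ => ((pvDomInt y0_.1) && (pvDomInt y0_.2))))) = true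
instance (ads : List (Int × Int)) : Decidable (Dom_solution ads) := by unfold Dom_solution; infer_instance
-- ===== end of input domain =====

-- B replaces A's O(n!·n) scan of all orderings by a per-first-ad closed form that sorts the
-- remaining weights descending (rearrangement inequality); measured asymptotically faster.


-- ===== PORT A =====
-- itertools.permutations(ads, len(ads)) is PySem.List.permutations; the inner 'for i in
-- range(len(candidate))' walks the candidate once carrying (temp, current_time).
def solution (ads : List (Int × Int)) : Int :=
  (PySem.List.permutations ads ads.length).foldl
    (fun answer candidate =>
      let current_time : Int := (PySem.List.pyGetD candidate 0 ((0 : Int), (0 : Int))).1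
      let temp :=
        (candidate.foldl
          (fun (st : Int × Int) p => (st.1 + (st.2 - p.1) * p.2, st.2 + 5))
          (0, current_time)).1
      min answer temp)
    0

-- ===== PORT B =====
def solution_alt (ads : List (Int × Int)) : Int :=
  (List.range ads.length).foldl
    (fun (best : Int) (i : Nat) =>
      let tf := (PySem.List.pyGetD ads (i : Int) ((0 : Int), (0 : Int))).1
      let rest := ads.take i ++ ads.drop (i + 1)
      let ws := PySem.List.sorted (rest.map (·.2)) (fun w => w) true
      let cost := (rest.map (fun p => tf * p.2 - p.1 * p.2)).sum
        + 5 * ((PySem.List.enumerate ws).map (fun jw => (jw.1 + 1) * jw.2)).sum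
      min best cost)
    0

-- ===== PRECONDITION & SPEC =====
-- On the empty list A indexes candidate[0] of the empty candidate and raises IndexError;
-- Pre_ excludes exactly that input.
def Pre_solution (ads : List (Int × Int)) : Prop := ads ≠ []
instance (ads : List (Int × Int)) : Decidable (Pre_solution ads) := by unfold Pre_solution; infer_instance
def pvWitness_solution : (List (Int × Int)) := [(1, 3), (10, 2), (4, 1)]

def Spec_solution (ads : List (Int × Int)) (out : Int) : Prop := out = solution_alt ads
instance (ads : List (Int × Int)) (out : Int) : Decidable (Spec_solution ads out) := by unfold Spec_solution; infer_instance

-- ===== CLAIM (what is proved, stated in full; the proofs are below) =====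
def Claim_equal_solution : Prop := ∀ (ads : List (Int × Int)), Dom_solution ads → Pre_solution ads → Spec_solution ads (solution ads)

-- ===== LEMMAS AND PROOFS =====

-- weighted positional sum: Pk k [w0, w1, …] = k*w0 + (k+1)*w1 + …
def Pk (k : Int) : List Int → Int
  | [] => 0
  | w :: l => k * w + Pk (k + 1) l

def Wsum (r : List (Int × Int)) : Int := (r.map (·.2)).sum
def TWsum (r : List (Int × Int)) : Int := (r.map (fun p => p.1 * p.2)).sum

-- the value A's inner loop computes for a candidate ordering
def phi (c : List (Int × Int)) : Int :=
  (PySem.List.pyGetD c 0 ((0 : Int), (0 : Int))).1 * Wsum c - TWsum c + 5 * Pk 0 (c.map (·.2))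

lemma Pk_shift (l : List Int) : ∀ k, Pk (k + 1) l = l.sum + Pk k l := by
  induction l with
  | nil => intro k; simp [Pk]
  | cons w l ih => intro k; simp [Pk, ih (k + 1)]; ring

lemma Pk_append (a b : List Int) : ∀ k, Pk k (a ++ b) = Pk k a + Pk (k + (a.length : Int)) b := by
  induction a with
  | nil => intro k; simp [Pk]
  | cons w a ih =>
    intro k
    simp only [List.cons_append, Pk, ih (k + 1), List.length_cons]
    push_cast
    ring_nf

lemma sum_le_length_mul {m : Int} (a : List Int) (h : ∀ x ∈ a, x ≤ m) :
    a.sum ≤ (a.length : Int) * m := by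
  induction a with
  | nil => simp
  | cons x a ih =>
    simp only [List.sum_cons, List.length_cons]
    have h1 := h x (by simp)
    have h2 := ih (fun y hy => h y (by simp [hy]))
    push_cast
    nlinarith [h1, h2]

-- rearrangement: a weakly descending list minimises the weighted positional sum
lemma pk_sorted_le (s : List Int) (hs : s.Pairwise (fun a b => b ≤ a)) :
    ∀ (l : List Int), l.Perm s → ∀ k, Pk k s ≤ Pk k l := by
  induction s with
  | nil => intro l hl k; rw [List.Perm.eq_nil (hl)]
  | cons m s ih =>
    intro l hl k
    have hm : m ∈ l := hl.mem_iff.mpr (by simp)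
    obtain ⟨a, b, rfl⟩ := List.mem_iff_append.mp hm
    have hmid : (a ++ m :: b).Perm (m :: (a ++ b)) := List.perm_middle
    have hab : (a ++ b).Perm s := (List.perm_cons m).mp (hmid.symm.trans hl)
    have hamax : ∀ x ∈ a, x ≤ m := by
      intro x hx
      have hx' : x ∈ m :: s := hl.mem_iff.mp (by simp [hx])
      rcases List.mem_cons.mp hx' with h | h
      · exact le_of_eq h
      · exact (List.pairwise_cons.mp hs).1 x h
    have ihs := ih (List.pairwise_cons.mp hs).2 (a ++ b) hab (k + 1)
    have key : k * m + Pk (k + 1) (a ++ b) ≤ Pk k (a ++ m :: b) := by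
      rw [Pk_append a (m :: b) k, Pk_append a b (k + 1)]
      simp only [Pk]
      have h1 : Pk (k + (a.length : Int) + 1) b = Pk (k + 1 + (a.length : Int)) b := by
        congr 1
        omega
      rw [h1]
      nlinarith [sum_le_length_mul a hamax, Pk_shift a k]
    calc Pk k (m :: s) = k * m + Pk (k + 1) s := rfl
      _ ≤ k * m + Pk (k + 1) (a ++ b) := by linarith [ihs]
      _ ≤ Pk k (a ++ m :: b) := key

-- A's inner fold in closed form
lemma inner_fold_eq (c : List (Int × Int)) : ∀ (temp cur : Int),
    (c.foldl (fun (st : Int × Int) p => (st.1 + (st.2 - p.1) * p.2, st.2 + 5)) (temp, cur)).1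
      = temp + cur * Wsum c - TWsum c + 5 * Pk 0 (c.map (·.2)) := by
  induction c with
  | nil => intro temp cur; simp [Wsum, TWsum, Pk]
  | cons p c ih =>
    intro temp cur
    simp only [List.foldl_cons, ih, Wsum, TWsum, List.map_cons, List.sum_cons, Pk]
    have := Pk_shift (c.map (·.2)) 0
    nlinarith [this]

lemma phi_cons (x : Int × Int) (r : List (Int × Int)) :
    phi (x :: r) = x.1 * Wsum r - TWsum r + 5 * Pk 1 (r.map (·.2)) := by
  simp only [phi, PySem.List.pyGetD_zero_cons, Wsum, TWsum, List.map_cons, List.sum_cons, Pk]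
  have := Pk_shift (r.map (·.2)) 0
  norm_num at this ⊢
  linarith [this]

lemma enumerate_sum (ws : List Int) : ∀ s : Int,
    ((PySem.List.enumerate ws s).map (fun jw => (jw.1 + 1) * jw.2)).sum = Pk (s + 1) ws := by
  induction ws with
  | nil => intro s; simp [PySem.List.enumerate_nil, Pk]
  | cons w ws ih =>
    intro s
    rw [PySem.List.enumerate_cons]
    simp only [List.map_cons, List.sum_cons, ih (s + 1), Pk]

-- the value B computes for pick index i (as B's port writes it)
def psi (ads : List (Int × Int)) (i : Nat) : Int :=
  (PySem.List.pyGetD ads (i : Int) ((0 : Int), (0 : Int))).1 * Wsum (ads.take i ++ ads.drop (i + 1))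
    - TWsum (ads.take i ++ ads.drop (i + 1))
    + 5 * Pk 1 (PySem.List.sorted ((ads.take i ++ ads.drop (i + 1)).map (·.2)) (fun w => w) true)

-- foldl-min toolkit
lemma foldl_min_le_init {α : Type} (f : α → Int) (l : List α) : ∀ z : Int,
    l.foldl (fun a x => min a (f x)) z ≤ z := by
  induction l with
  | nil => intro z; simp
  | cons x l ih =>
    intro z
    exact le_trans (ih (min z (f x))) (min_le_left _ _)

lemma foldl_min_le_mem {α : Type} (f : α → Int) (l : List α) {x : α} (hx : x ∈ l) : ∀ z : Int,
    l.foldl (fun a y => min a (f y)) z ≤ f x := by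
  induction l with
  | nil => cases hx
  | cons y l ih =>
    intro z
    rcases List.mem_cons.mp hx with h | h
    · subst h
      exact le_trans (foldl_min_le_init f l _) (min_le_right _ _)
    · exact ih h _
  
lemma le_foldl_min {α : Type} (f : α → Int) (l : List α) {c : Int} (hl : ∀ x ∈ l, c ≤ f x) :
    ∀ z : Int, c ≤ z → c ≤ l.foldl (fun a x => min a (f x)) z := by
  induction l with
  | nil => intro z hz; simpa
  | cons x l ih =>
    intro z hz
    exact ih (fun y hy => hl y (by simp [hy])) _ (le_min hz (hl x (by simp)))

-- completeness of PySem.List.permutations: every rearrangement is generated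
lemma mem_permutations_of_perm : ∀ (p xs : List (Int × Int)), p.Perm xs →
    p ∈ PySem.List.permutations xs xs.length := by
  intro p
  induction p with
  | nil =>
    intro xs h
    rw [(List.Perm.eq_nil h.symm)]
    simp [PySem.List.permutations_zero]
  | cons x p ih =>
    intro xs h
    have hx : x ∈ xs := h.mem_iff.mp (by simp)
    have hlen : xs.length = p.length + 1 := by
      have := h.length_eq; simp at this; omega
    rw [hlen, PySem.List.permutations_succ]
    rw [List.mem_flatMap]
    refine ⟨xs.idxOf x, ?_, ?_⟩
    · rw [List.mem_range]; exact List.idxOf_lt_length_of_mem hx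
    · have hget : xs[xs.idxOf x]? = some x := by
        rw [List.getElem?_eq_getElem (List.idxOf_lt_length_of_mem hx)]
        simp [List.getElem_idxOf]
      rw [hget]
      simp only [List.mem_map]
      refine ⟨p, ?_, rfl⟩
      have herase : xs.eraseIdx (xs.idxOf x) = xs.erase x := List.eraseIdx_idxOf_eq_erase x xs
      have hperm : p.Perm (xs.erase x) :=
        (List.perm_cons x).mp (h.trans (List.perm_cons_erase hx))
      have hlen' : (xs.erase x).length = p.length := by
        rw [List.length_erase_of_mem hx, hlen]; simp
      rw [herase, ← hlen']
      exact ih (xs.erase x) hperm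

-- decomposition of xs at index i
lemma perm_getElem_cons_eraseIdx (xs : List (Int × Int)) (i : Nat) (h : i < xs.length) :
    xs.Perm (xs[i] :: (xs.take i ++ xs.drop (i + 1))) := by
  rw [← List.eraseIdx_eq_take_drop_succ]
  exact (List.getElem_cons_eraseIdx_perm h).symm

-- weights of weight-sorted pairs are the sorted weights
lemma map_snd_sorted (r : List (Int × Int)) :
    (PySem.List.sorted r (·.2) true).map (·.2)
      = PySem.List.sorted (r.map (·.2)) (fun w => w) true := by
  apply List.Perm.eq_of_pairwise (le := fun a b => b ≤ a)
  · intro a b _ _ h1 h2; omega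
  · exact List.Pairwise.map _ (fun a b h => h) (PySem.List.sorted_pairwise_rev r (·.2))
  · exact PySem.List.sorted_pairwise_rev (r.map (·.2)) (fun w => w)
  · exact ((PySem.List.sorted_perm r (·.2) true).map (·.2)).trans
      ((PySem.List.sorted_perm (r.map (·.2)) (fun w => w) true).symm)

lemma Wsum_perm {r r' : List (Int × Int)} (h : r.Perm r') : Wsum r = Wsum r' := by
  exact List.Perm.sum_eq (h.map (·.2))

lemma TWsum_perm {r r' : List (Int × Int)} (h : r.Perm r') : TWsum r = TWsum r' := by
  exact List.Perm.sum_eq (h.map (fun p => p.1 * p.2))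

-- ψ i ≤ φ c for any candidate c starting with ads[i] whose tail is a rearrangement of the rest
lemma tf_eq (ads : List (Int × Int)) (i : Nat) (hi : i < ads.length) :
    (PySem.List.pyGetD ads (i : Int) ((0 : Int), (0 : Int))) = ads[i] := by
  rw [PySem.List.pyGetD_natCast]
  exact List.getD_eq_getElem ads _ hi

lemma psi_le_phi (ads : List (Int × Int)) (i : Nat) (hi : i < ads.length)
    (r : List (Int × Int)) (hr : r.Perm (ads.take i ++ ads.drop (i + 1))) :
    psi ads i ≤ phi (ads[i] :: r) := by
  rw [phi_cons]
  unfold psi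
  rw [tf_eq ads i hi]
  have h1 := Wsum_perm hr
  have h2 := TWsum_perm hr
  have h3 : Pk 1 (PySem.List.sorted ((ads.take i ++ ads.drop (i + 1)).map (·.2)) (fun w => w) true)
      ≤ Pk 1 (r.map (·.2)) := by
    apply pk_sorted_le _ (PySem.List.sorted_pairwise_rev _ (fun w => w))
    exact (hr.map (·.2)).trans
      (PySem.List.sorted_perm ((ads.take i ++ ads.drop (i + 1)).map (·.2)) (fun w => w) true).symm
  rw [h1, h2]
  linarith [h3]

-- φ at the per-pick sorted candidate is exactly ψ
lemma phi_pick_sorted (ads : List (Int × Int)) (i : Nat) (hi : i < ads.length) :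
    phi (ads[i] :: PySem.List.sorted (ads.take i ++ ads.drop (i + 1)) (·.2) true) = psi ads i := by
  rw [phi_cons]
  unfold psi
  rw [tf_eq ads i hi, map_snd_sorted]
  have h1 := Wsum_perm (PySem.List.sorted_perm (ads.take i ++ ads.drop (i + 1)) (·.2) true)
  have h2 := TWsum_perm (PySem.List.sorted_perm (ads.take i ++ ads.drop (i + 1)) (·.2) true)
  rw [h1, h2]

-- the two ports as folds of min over φ / ψ
lemma solution_eq_fold (ads : List (Int × Int)) :
    solution ads = (PySem.List.permutations ads ads.length).foldl (fun a c => min a (phi c)) 0 := by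
  unfold solution
  congr 1
  funext a c
  dsimp only
  rw [inner_fold_eq]
  simp only [phi]
  norm_num

lemma solution_alt_eq_fold (ads : List (Int × Int)) :
    solution_alt ads = (List.range ads.length).foldl (fun b i => min b (psi ads i)) 0 := by
  unfold solution_alt
  congr 1
  funext b i
  dsimp only
  simp only [enumerate_sum, psi]
  congr 1
  have : ∀ (tf : Int) (r : List (Int × Int)),
      (r.map (fun p => tf * p.2 - p.1 * p.2)).sum
        = tf * (r.map (·.2)).sum - (r.map (fun p => p.1 * p.2)).sum := by
    intro tf r
    induction r with
    | nil => simp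
    | cons p r ih => simp [ih]; ring
  rw [this]
  simp only [Wsum, TWsum]
  norm_num

-- ===== VERDICT (by name: the statement is the Claim_ definition above) =====
theorem solution_spec : Claim_equal_solution := by
  intro ads _ hpre
  unfold Spec_solution
  rw [solution_eq_fold, solution_alt_eq_fold]
  apply le_antisymm
  · -- A's minimum ≤ every ψ i: the sorted pick is itself a generated candidate
    apply le_foldl_min
    · intro i hi
      rw [List.mem_range] at hi
      set c := ads[i] :: PySem.List.sorted (ads.take i ++ ads.drop (i + 1)) (·.2) true with hc
      have hcperm : c.Perm ads := by
        refine List.Perm.trans ?_ (perm_getElem_cons_eraseIdx ads i hi).symm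
        exact List.Perm.cons _ (PySem.List.sorted_perm _ _ _)
      have hmem := mem_permutations_of_perm c ads hcperm
      calc (PySem.List.permutations ads ads.length).foldl (fun a c => min a (phi c)) 0
          ≤ phi c := foldl_min_le_mem phi _ hmem 0
        _ = psi ads i := phi_pick_sorted ads i hi
    · exact foldl_min_le_init phi _ 0
  · -- B's minimum ≤ every candidate's cost: rearrangement
    apply le_foldl_min
    · intro c hmem
      have hcperm := PySem.List.perm_of_mem_permutations hmem
      cases c with
      | nil =>
        exfalso
        have := hcperm.length_eq
        simp at this
        exact hpre (List.eq_nil_of_length_eq_zero this.symm)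
      | cons x r =>
        have hx : x ∈ ads := hcperm.mem_iff.mp (by simp)
        have hi : ads.idxOf x < ads.length := List.idxOf_lt_length_of_mem hx
        have hget : ads[ads.idxOf x] = x := List.getElem_idxOf hi
        have hr : r.Perm (ads.take (ads.idxOf x) ++ ads.drop (ads.idxOf x + 1)) := by
          rw [← List.eraseIdx_eq_take_drop_succ, List.eraseIdx_idxOf_eq_erase x ads]
          exact (List.perm_cons x).mp (hcperm.trans (List.perm_cons_erase hx))
        calc (List.range ads.length).foldl (fun b i => min b (psi ads i)) 0
            ≤ psi ads (ads.idxOf x) := foldl_min_le_mem (psi ads) _ (List.mem_range.mpr hi) 0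
          _ ≤ phi (ads[ads.idxOf x] :: r) := psi_le_phi ads (ads.idxOf x) hi r hr
          _ = phi (x :: r) := by rw [hget]
    · exact foldl_min_le_init (psi ads) _ 0
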